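-- pv_equiv track=rewrite | github.com/EstebanM-98/mestrado_thz_physics | functions_master.py | agrupar_por_rango_temperatura
-- ===== SOURCE A (Python) =====
-- def agrupar_por_rango_temperatura(archivos_por_temp, rangos):
--     archivos_por_rango = {rango: [] for rango in rangos}
--     for temp, archivos in archivos_por_temp.items():
--         for rango in rangos:
--             if rango[0] <= temp < rango[1]:  # Verifica si la temperatura está dentro del rango
--                 archivos_por_rango[rango].extend(archivos)
--                 break  # Detiene el ciclo una vez que encuentra el rango correcto
--
--     archivos_por_rango  = {k: v for k, v in archivos_por_rango .items() if v}
--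
--     return archivos_por_rango
-- ===== SOURCE B (Python) =====
-- def agrupar_por_rango_temperatura(archivos_por_temp, rangos):
--     # Range-major sweep over a shrinking work list: each range consumes the
--     # still-unassigned temperatures that fall inside it.
--     resultado = {}
--     restantes = list(archivos_por_temp.items())
--     for rango in rangos:
--         grupo = []
--         siguientes = []
--         for temp, archivos in restantes:
--             if rango[0] <= temp < rango[1]:
--                 grupo.extend(archivos)
--             else:
--                 siguientes.append((temp, archivos))
--         if grupo:
--             resultado[rango] = grupo
--         restantes = siguientes
--     return resultado
-- ===== Notes on version B (the rewrite author's own statement) =====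
-- stated objective: alternative
-- what changed: Replaces A's temperature-major loop (for each temperature, scan rangos for the first matching range with break and extend its dict entry, then drop empty groups) with a range-major sweep over a shrinking work list: each range in order consumes from the remaining entries the temperatures it contains, and a group is recorded only when non-empty.
import Mathlib
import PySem

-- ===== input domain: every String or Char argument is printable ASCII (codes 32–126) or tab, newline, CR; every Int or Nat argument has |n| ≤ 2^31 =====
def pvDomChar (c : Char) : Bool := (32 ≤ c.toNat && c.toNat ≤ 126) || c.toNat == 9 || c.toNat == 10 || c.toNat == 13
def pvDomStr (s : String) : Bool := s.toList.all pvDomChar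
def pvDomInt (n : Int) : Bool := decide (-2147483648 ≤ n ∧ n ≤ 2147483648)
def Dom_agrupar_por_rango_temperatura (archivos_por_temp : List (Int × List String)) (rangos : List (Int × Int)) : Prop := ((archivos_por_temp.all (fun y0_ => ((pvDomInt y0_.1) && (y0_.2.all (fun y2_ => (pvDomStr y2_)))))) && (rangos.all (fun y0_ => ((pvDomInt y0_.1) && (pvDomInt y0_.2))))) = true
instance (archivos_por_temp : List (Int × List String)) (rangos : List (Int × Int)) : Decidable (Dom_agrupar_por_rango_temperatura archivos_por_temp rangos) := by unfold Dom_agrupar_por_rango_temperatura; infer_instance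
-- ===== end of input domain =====

-- B replaces A's temperature-major loop (first matching range per temperature, with
-- break) by a range-major sweep over a shrinking work list of still-unassigned
-- temperatures; same output values and order (objective: alternative decomposition).

-- ===== PORT A =====
-- output dict (Int×Int) → List String is returned as List (Int × Int × List String),
-- re-associating ((a,b),v) to (a,b,v) per the type convention.
def agrupar_por_rango_temperatura (archivos_por_temp : List (Int × List String)) (rangos : List (Int × Int)) : List (Int × Int × List String) :=
  -- d0 = {rango: [] for rango in rangos}; then the temp loop (inner for/break = find? of
  -- the first matching rango, then .extend); finally {k: v for k, v in d.items() if v}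
  ((archivos_por_temp.foldl (fun d p =>
      match rangos.find? (fun rango => decide (rango.1 ≤ p.1) && decide (p.1 < rango.2)) with
      | some rango => d.modify rango [] (fun v => v ++ p.2)   -- archivos_por_rango[rango].extend(archivos)
      | none => d)
    (rangos.foldl (fun d rango => d.insert rango []) (PySem.Dict.empty : PySem.Dict (Int × Int) (List String)))).items.filter
      (fun kv => !kv.2.isEmpty)).map (fun kv => (kv.1.1, kv.1.2, kv.2))

-- ===== PORT B =====
def agrupar_por_rango_temperatura_alt (archivos_por_temp : List (Int × List String)) (rangos : List (Int × Int)) : List (Int × Int × List String) :=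
  -- resultado = {}; restantes = list(archivos_por_temp.items()); for rango in rangos:
  -- one pass over restantes splits it into grupo (files of temps inside rango) and
  -- siguientes (entries kept for later ranges); grupo is recorded if non-empty
  (rangos.foldl (fun st rango =>
      match st.2.foldl (fun gn p =>
          if decide (rango.1 ≤ p.1) && decide (p.1 < rango.2)
          then (gn.1 ++ p.2, gn.2)         -- grupo.extend(archivos)
          else (gn.1, gn.2 ++ [p]))        -- siguientes.append((temp, archivos))
        ([], []) with
      | gn => (if !gn.1.isEmpty then st.1.insert rango gn.1 else st.1, gn.2))
    ((PySem.Dict.empty : PySem.Dict (Int × Int) (List String)), archivos_por_temp)).1.items.map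
      (fun kv => (kv.1.1, kv.1.2, kv.2))

-- ===== PRECONDITION & SPEC =====
def Spec_agrupar_por_rango_temperatura (archivos_por_temp : List (Int × List String)) (rangos : List (Int × Int)) (out : List (Int × Int × List String)) : Prop := out = agrupar_por_rango_temperatura_alt archivos_por_temp rangos
instance (archivos_por_temp : List (Int × List String)) (rangos : List (Int × Int)) (out : List (Int × Int × List String)) : Decidable (Spec_agrupar_por_rango_temperatura archivos_por_temp rangos out) := by unfold Spec_agrupar_por_rango_temperatura; infer_instance

-- ===== CLAIM (what is proved, stated in full; the proofs are below) =====
def Claim_equal_agrupar_por_rango_temperatura : Prop := ∀ (archivos_por_temp : List (Int × List String)) (rangos : List (Int × Int)), Dom_agrupar_por_rango_temperatura archivos_por_temp rangos → Spec_agrupar_por_rango_temperatura archivos_por_temp rangos (agrupar_por_rango_temperatura archivos_por_temp rangos)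

-- ===== LEMMAS AND PROOFS =====

-- the Bool range test both programs use
def pvInR (r : Int × Int) (t : Int) : Bool := decide (r.1 ≤ t) && decide (t < r.2)

-- first range (in rangos order) containing t — A's inner for/break
def pvMt (rangos : List (Int × Int)) (t : Int) : Option (Int × Int) :=
  rangos.find? (fun rango => pvInR rango t)

-- all files (in archivos_por_temp order) of temps whose first matching range is r
def pvColl (rangos : List (Int × Int)) (apt : List (Int × List String)) (r : Int × Int) : List String :=
  ((apt.filter (fun p => pvMt rangos p.1 == some r)).map (·.2)).flatten

theorem pv_dedup_append_singleton {α : Type} [BEq α] [LawfulBEq α] (l : List α) (x : α) :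
    PySem.List.dedup (l ++ [x]) = if x ∈ l then PySem.List.dedup l else PySem.List.dedup l ++ [x] := by
  simp only [PySem.List.dedup_eq_ofList, PySem.Set.ofList_append_singleton,
    PySem.Set.add_eq_ite, PySem.Set.mem_ofList]

theorem pvA_init (rangos : List (Int × Int)) :
    (rangos.foldl (fun d rango => d.insert rango []) (PySem.Dict.empty : PySem.Dict (Int × Int) (List String))).items
      = (PySem.List.dedup rangos).map (fun r => (r, ([] : List String))) := by
  induction rangos using List.reverseRecOn with
  | nil => simp [PySem.List.dedup, PySem.Dict.empty]
  | append_singleton l x ih =>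
    rw [List.foldl_append, List.foldl_cons, List.foldl_nil, pv_dedup_append_singleton]
    have hk : (l.foldl (fun d rango => d.insert rango []) (PySem.Dict.empty : PySem.Dict (Int × Int) (List String))).contains x
        = decide (x ∈ l) := by
      rw [PySem.Dict.contains_eq_decide_mem_keys]
      simp [PySem.Dict.keys, ih]
    by_cases hx : x ∈ l
    · rw [PySem.Dict.items_insert_of_contains _ _ (by simp [hk, hx])]
      simp only [ih, if_pos hx, List.map_map]
      apply List.map_congr_left
      intro r hr
      by_cases h : r = x <;> simp [h]
    · rw [PySem.Dict.items_insert_of_not_contains _ _ (by simp [hk, hx])]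
      simp [ih, if_neg hx]

theorem pvColl_append (rangos : List (Int × Int)) (l : List (Int × List String)) (p : Int × List String) (r : Int × Int) :
    pvColl rangos (l ++ [p]) r = pvColl rangos l r ++ (if pvMt rangos p.1 == some r then p.2 else []) := by
  simp only [pvColl, List.filter_append, List.map_append, List.flatten_append]
  by_cases h : pvMt rangos p.1 == some r <;> simp [h]

theorem pvA_main (rangos : List (Int × Int)) (apt : List (Int × List String)) :
    (apt.foldl (fun d p =>
      match rangos.find? (fun rango => decide (rango.1 ≤ p.1) && decide (p.1 < rango.2)) with
      | some rango => d.modify rango [] (fun v => v ++ p.2)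
      | none => d)
      (rangos.foldl (fun d rango => d.insert rango []) (PySem.Dict.empty : PySem.Dict (Int × Int) (List String)))).items
      = (PySem.List.dedup rangos).map (fun r => (r, pvColl rangos apt r)) := by
  induction apt using List.reverseRecOn with
  | nil =>
    rw [List.foldl_nil, pvA_init]
    simp [pvColl]
  | append_singleton l p ih =>
    rw [List.foldl_append, List.foldl_cons, List.foldl_nil]
    set D := (l.foldl (fun d p =>
      match rangos.find? (fun rango => decide (rango.1 ≤ p.1) && decide (p.1 < rango.2)) with
      | some rango => d.modify rango [] (fun v => v ++ p.2)
      | none => d)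
      (rangos.foldl (fun d rango => d.insert rango []) (PySem.Dict.empty : PySem.Dict (Int × Int) (List String)))) with hD
    have hfind : rangos.find? (fun rango => decide (rango.1 ≤ p.1) && decide (p.1 < rango.2)) = pvMt rangos p.1 := rfl
    rw [hfind]
    have hkeys : D.keys = PySem.List.dedup rangos := by
      show D.items.map (fun x => x.1) = _
      simp [ih, Function.comp_def]
    cases hmt : pvMt rangos p.1 with
    | none =>
      show D.items = _
      rw [ih]
      apply List.map_congr_left
      intro r hr
      rw [pvColl_append, hmt]
      simp
    | some r0 =>
      have hr0mem : r0 ∈ rangos := List.mem_of_find?_eq_some hmt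
      have hr0kd : r0 ∈ PySem.List.dedup rangos := by simpa [PySem.List.dedup_eq_ofList, PySem.Set.mem_ofList] using hr0mem
      show (D.insert r0 (D.getD r0 [] ++ p.2)).items = _
      rw [PySem.Dict.getD_of_mem_items _ (by rw [ih]; exact List.mem_map_of_mem hr0kd)
            (by rw [hkeys]; exact PySem.List.nodup_dedup rangos) []]
      rw [PySem.Dict.items_insert_of_contains _ _
            (by rw [PySem.Dict.contains_eq_decide_mem_keys, hkeys]; simp [hr0mem])]
      rw [ih, List.map_map]
      apply List.map_congr_left
      intro r hr
      by_cases h : r = r0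
      · subst h
        simp [pvColl_append, hmt]
      · have hb : (r == r0) = false := by simp [h]
        simp [hb, pvColl_append, hmt, Function.comp, Ne.symm h]

theorem pvB_inner (rango : Int × Int) (l : List (Int × List String)) (g : List String) (n : List (Int × List String)) :
    (l.foldl (fun gn p =>
        if decide (rango.1 ≤ p.1) && decide (p.1 < rango.2)
        then (gn.1 ++ p.2, gn.2)
        else (gn.1, gn.2 ++ [p])) (g, n))
      = (g ++ ((l.filter (fun p => pvInR rango p.1)).map (·.2)).flatten,
         n ++ l.filter (fun p => !(pvInR rango p.1))) := by
  induction l generalizing g n with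
  | nil => simp
  | cons p rest ih =>
    rw [List.foldl_cons]
    by_cases h : pvInR rango p.1 = true
    · obtain ⟨h1, h2⟩ : rango.1 ≤ p.1 ∧ p.1 < rango.2 := by simpa [pvInR] using h
      rw [if_pos (by simp [h1, h2])]
      rw [ih]
      simp [List.filter_cons, h, List.append_assoc]
    · have h' : pvInR rango p.1 = false := Bool.eq_false_iff.mpr h
      rw [if_neg (by simpa [pvInR, Bool.and_eq_true] using h), ih]
      simp [List.filter_cons, h', List.append_assoc]

-- for a range r not seen before, "survived every earlier range and lies in r" = "first matching range is r"

theorem pv_cond_eq_mt (pre suf : List (Int × Int)) (r : Int × Int) (hrpre : r ∉ pre) (t : Int) :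
    (pre.all (fun r' => !(pvInR r' t)) && pvInR r t) = (pvMt (pre ++ r :: suf) t == some r) := by
  by_cases hA : pre.all (fun r' => !(pvInR r' t)) = true
  · have hpre : pre.find? (fun rango => pvInR rango t) = none := by
      apply List.find?_eq_none.mpr
      intro x hx
      simpa using List.all_eq_true.mp hA x hx
    rw [hA, Bool.true_and]
    by_cases hr : pvInR r t = true
    · rw [hr, pvMt, List.find?_append, hpre, Option.none_or,
        List.find?_cons_of_pos (p := fun rango => pvInR rango t) hr]
      simp
    · have hr' : pvInR r t = false := Bool.eq_false_iff.mpr hr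
      rw [hr', pvMt, List.find?_append, hpre, Option.none_or,
        List.find?_cons_of_neg (p := fun rango => pvInR rango t) (by simp [hr'])]
      rcases h : suf.find? (fun rango => pvInR rango t) with _ | y
      · simp
      · have hpy : pvInR y t = true := by simpa using List.find?_some h
        have hne : y ≠ r := fun he => hr (he ▸ hpy)
        simp [hne]
  · -- some earlier range matched t: both sides false
    obtain ⟨r', hr', hir⟩ : ∃ r' ∈ pre, pvInR r' t = true := by
      rcases List.all_eq_false.mp (Bool.eq_false_iff.mpr hA) with ⟨x, hx, hb⟩
      exact ⟨x, hx, by simpa using hb⟩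
    have hfind : ∃ y, (pre.find? (fun rango => pvInR rango t)) = some y := by
      rcases h : pre.find? (fun rango => pvInR rango t) with _ | y
      · exact absurd hir (by simpa using List.find?_eq_none.mp h r' hr')
      · exact ⟨y, rfl⟩
    obtain ⟨y, hy⟩ := hfind
    have hymem : y ∈ pre := List.mem_of_find?_eq_some hy
    have hmt : pvMt (pre ++ r :: suf) t = some y := by
      rw [pvMt, List.find?_append, hy]; rfl
    have hyne : (some y == some r) = false := by
      have : y ≠ r := fun he => hrpre (he ▸ hymem)
      simp [this]
    rw [hmt, hyne, Bool.eq_false_iff.mpr hA, Bool.false_and]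

theorem pvB_outer (apt : List (Int × List String)) (rangos : List (Int × Int)) :
    ∀ (suf pre : List (Int × Int)) (rem : List (Int × List String)) (res : PySem.Dict (Int × Int) (List String)),
    rangos = pre ++ suf →
    rem = apt.filter (fun p => pre.all (fun r' => !(pvInR r' p.1))) →
    res.items = ((PySem.List.dedup pre).filter (fun r => !(pvColl rangos apt r).isEmpty)).map (fun r => (r, pvColl rangos apt r)) →
    (suf.foldl (fun st rango =>
      match st.2.foldl (fun gn p =>
          if decide (rango.1 ≤ p.1) && decide (p.1 < rango.2)
          then (gn.1 ++ p.2, gn.2)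
          else (gn.1, gn.2 ++ [p])) ([], []) with
      | gn => (if !gn.1.isEmpty then st.1.insert rango gn.1 else st.1, gn.2))
      (res, rem)).1.items
      = ((PySem.List.dedup rangos).filter (fun r => !(pvColl rangos apt r).isEmpty)).map (fun r => (r, pvColl rangos apt r)) := by
  intro suf
  induction suf with
  | nil =>
    intro pre rem res hr _ hres
    rw [List.foldl_nil, hres, hr, List.append_nil]
  | cons r suf' ih =>
    intro pre rem res hr hrem hres
    rw [List.foldl_cons, pvB_inner r rem [] []]
    have hnext : rem.filter (fun p => !(pvInR r p.1))
        = apt.filter (fun p => (pre ++ [r]).all (fun r' => !(pvInR r' p.1))) := by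
      rw [hrem, List.filter_filter]
      apply List.filter_congr
      intro p _
      simp [List.all_append, Bool.and_comm]
    by_cases hrp : r ∈ pre
    · -- a repeated range: every temperature it covers was consumed earlier
      have hG : rem.filter (fun p => pvInR r p.1) = [] := by
        apply List.filter_eq_nil_iff.mpr
        intro p hp
        have := (List.mem_filter.mp (hrem ▸ hp)).2
        simpa using List.all_eq_true.mp this r hrp
      rw [hG]
      simp only [List.map_nil, List.nil_append, List.flatten_nil, List.append_nil, List.nil_append,
        List.isEmpty_nil, Bool.not_true, Bool.false_eq_true, if_false]
      apply ih (pre ++ [r]) _ res (by rw [hr, List.append_assoc]; rfl) hnext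
      rw [pv_dedup_append_singleton, if_pos hrp]
      exact hres
    · -- a fresh range: it consumes exactly the temps whose first matching range is r
      have hG : rem.filter (fun p => pvInR r p.1) = apt.filter (fun p => pvMt rangos p.1 == some r) := by
        rw [hrem, List.filter_filter]
        apply List.filter_congr
        intro p _
        rw [hr, Bool.and_comm]
        exact pv_cond_eq_mt pre suf' r hrp p.1
      rw [hG]
      have hgr : ((apt.filter (fun p => pvMt rangos p.1 == some r)).map (·.2)).flatten = pvColl rangos apt r := rfl
      rw [hgr]
      simp only [List.nil_append]
      by_cases hg : (pvColl rangos apt r).isEmpty = true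
      · -- empty group: nothing inserted, and the range is filtered out of the claim too
        rw [if_neg (by simp [hg])]
        apply ih (pre ++ [r]) _ res (by rw [hr, List.append_assoc]; rfl) hnext
        rw [pv_dedup_append_singleton, if_neg hrp, List.filter_append, hres]
        simp [hg]
      · -- non-empty group: r is fresh in res, so the insert appends (r, grupo)
        rw [if_pos (by simp [Bool.eq_false_iff.mpr hg])]
        apply ih (pre ++ [r]) _ _ (by rw [hr, List.append_assoc]; rfl) hnext
        have hfresh : res.contains r = false := by
          rw [PySem.Dict.contains_eq_decide_mem_keys]
          simp only [decide_eq_false_iff_not]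
          intro hmem
          have hrd : r ∈ PySem.List.dedup pre := by
            have hkeys : res.keys = (((PySem.List.dedup pre).filter (fun r => !(pvColl rangos apt r).isEmpty)).map (fun r => (r, pvColl rangos apt r))).map (fun x => x.1) := by
              show res.items.map (fun x => x.1) = _
              rw [hres]
            rw [hkeys, List.map_map] at hmem
            obtain ⟨y, hy, hyr⟩ := List.mem_map.mp hmem
            have := List.mem_filter.mp hy
            simpa [← hyr] using this.1
          exact hrp (by simpa [PySem.List.dedup_eq_ofList, PySem.Set.mem_ofList] using hrd)
        rw [PySem.Dict.items_insert_of_not_contains _ _ hfresh, hres]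
        rw [pv_dedup_append_singleton, if_neg hrp, List.filter_append]
        simp [hg]

theorem pvB_spec (rangos : List (Int × Int)) (apt : List (Int × List String)) :
    (rangos.foldl (fun st rango =>
      match st.2.foldl (fun gn p =>
          if decide (rango.1 ≤ p.1) && decide (p.1 < rango.2)
          then (gn.1 ++ p.2, gn.2)
          else (gn.1, gn.2 ++ [p])) ([], []) with
      | gn => (if !gn.1.isEmpty then st.1.insert rango gn.1 else st.1, gn.2))
      ((PySem.Dict.empty : PySem.Dict (Int × Int) (List String)), apt)).1.items
      = ((PySem.List.dedup rangos).filter (fun r => !(pvColl rangos apt r).isEmpty)).map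
          (fun r => (r, pvColl rangos apt r)) := by
  apply pvB_outer apt rangos rangos [] apt PySem.Dict.empty rfl
  · simp
  · simp [PySem.Dict.empty, PySem.List.dedup]

-- ===== VERDICT (by name: the statement is the Claim_ definition above) =====
theorem agrupar_por_rango_temperatura_spec : Claim_equal_agrupar_por_rango_temperatura := by
  intro apt rangos _
  unfold Spec_agrupar_por_rango_temperatura agrupar_por_rango_temperatura agrupar_por_rango_temperatura_alt
  rw [pvA_main rangos apt, pvB_spec rangos apt, List.filter_map]
  rw [List.map_map, List.map_map]
  rfl
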